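-- pv_equiv track=rewrite | github.com/Schaitanya535/python-sandbox | advent_of_code/2025/day_01.py | count_zero_hits
-- ===== SOURCE A (Python) =====
-- def count_zero_hits(start_position: int, instructions: list[str]) -> int:
--     position = start_position
--     count = 0
--     for instruction in instructions:
--         direction = instruction[0]
--         amount = int(instruction[1:])
--
--         if direction == "L":
--             position = (position - amount) % 100
--         else:
--             position = (position + amount) % 100
--
--         if position == 0:
--             count += 1
--
--     return count
-- ===== SOURCE B (Python) =====
-- def count_zero_hits(start_position: int, instructions: list[str]) -> int:
--     # Pass 1: parse each instruction into a signed delta.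
--     deltas = [-int(s[1:]) if s.startswith("L") else int(s[1:]) for s in instructions]
--     # Pass 2: turn deltas into an in-place prefix-sum table of net movement.
--     for i in range(1, len(deltas)):
--         deltas[i] += deltas[i - 1]
--     # Pass 3: count the running positions that are multiples of 100.
--     return sum(1 for t in deltas if (start_position + t) % 100 == 0)
-- ===== Notes on version B (the rewrite author's own statement) =====
-- stated objective: alternative
-- what changed: A's single branch-and-update loop (mod-100 position carried step by step with an inline counter) is replaced by three separate passes: parse instructions to signed deltas, turn them in place into a prefix-sum table of net movement, then count entries where start+total is a multiple of 100.
-- outside the precondition, e.g. on count_zero_hits(0, ['']): A raises IndexError, B raises ValueError; on count_zero_hits(0, ['L']): A raises ValueError, B raises ValueError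
import Mathlib
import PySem

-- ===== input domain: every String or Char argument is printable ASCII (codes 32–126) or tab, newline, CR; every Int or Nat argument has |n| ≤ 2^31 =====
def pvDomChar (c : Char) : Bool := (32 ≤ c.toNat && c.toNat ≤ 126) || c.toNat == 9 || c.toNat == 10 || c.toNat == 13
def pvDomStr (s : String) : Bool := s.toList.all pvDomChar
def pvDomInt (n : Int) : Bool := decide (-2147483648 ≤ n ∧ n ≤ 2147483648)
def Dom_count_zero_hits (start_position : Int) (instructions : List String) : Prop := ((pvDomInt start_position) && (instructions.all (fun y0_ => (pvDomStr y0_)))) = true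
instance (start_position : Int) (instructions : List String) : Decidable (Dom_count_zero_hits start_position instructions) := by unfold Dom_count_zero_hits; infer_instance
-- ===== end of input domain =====

-- B replaces A's single branch-and-update loop by three passes (parse to signed
-- deltas, in-place prefix-sum table, count multiples of 100); same cost, different decomposition.

-- ===== PORT A =====
-- one loop iteration of A: state = (position, count)
def czhStepA (st : Int × Int) (instruction : String) : Int × Int :=
  let direction := (PySem.Str.pyGet? instruction 0).getD ' '
  let amount := (PySem.Int.ofStr? (PySem.Str.slice instruction (some 1) none)).getD 0
  let position :=
    if direction = 'L' then PySem.Int.mod (st.1 - amount) 100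
    else PySem.Int.mod (st.1 + amount) 100
  (position, if position = 0 then st.2 + 1 else st.2)

def count_zero_hits (start_position : Int) (instructions : List String) : Int :=
  (instructions.foldl czhStepA (start_position, 0)).2

-- ===== PORT B =====
-- pass 1 of Source B: instruction -> signed delta
def czhDelta (s : String) : Int :=
  let amount := (PySem.Int.ofStr? (PySem.Str.slice s (some 1) none)).getD 0
  if PySem.Str.startswith s "L" then -amount else amount

def count_zero_hits_alt (start_position : Int) (instructions : List String) : Int :=
  let deltas := instructions.map czhDelta
  -- pass 2 of Source B: in-place prefix sums, transcribed as an accumulator fold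
  let totals := (deltas.foldl (fun (st : Int × List Int) d => (st.1 + d, st.2 ++ [st.1 + d]))
                  ((0 : Int), ([] : List Int))).2
  -- pass 3 of Source B: sum(1 for t in totals if (start_position + t) % 100 == 0)
  ((totals.countP (fun t => PySem.Int.mod (start_position + t) 100 == 0) : Nat) : Int)

-- ===== PRECONDITION & SPEC =====
-- Pre_ excludes exactly the inputs where Python A raises: an empty instruction
-- (IndexError on instruction[0]) or a tail that int() cannot parse (ValueError).
def Pre_count_zero_hits (start_position : Int) (instructions : List String) : Prop :=
  ∀ s ∈ instructions, s ≠ "" ∧ (PySem.Int.ofStr? (PySem.Str.slice s (some 1) none)).isSome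
instance (start_position : Int) (instructions : List String) : Decidable (Pre_count_zero_hits start_position instructions) := by unfold Pre_count_zero_hits; infer_instance

def pvWitness_count_zero_hits : Int × List String := (3, ["L5", "R102", "L-98"])

def Spec_count_zero_hits (start_position : Int) (instructions : List String) (out : Int) : Prop := out = count_zero_hits_alt start_position instructions
instance (start_position : Int) (instructions : List String) (out : Int) : Decidable (Spec_count_zero_hits start_position instructions out) := by unfold Spec_count_zero_hits; infer_instance

-- ===== CLAIM (what is proved, stated in full; the proofs are below) =====
def Claim_equal_count_zero_hits : Prop := ∀ (start_position : Int) (instructions : List String), Dom_count_zero_hits start_position instructions → Pre_count_zero_hits start_position instructions → Spec_count_zero_hits start_position instructions (count_zero_hits start_position instructions)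

-- ===== LEMMAS AND PROOFS =====

-- proof-side view of B's prefix-sum table
def czhPrefixes (t : Int) : List Int → List Int
  | [] => []
  | d :: ds => (t + d) :: czhPrefixes (t + d) ds

-- proof-side count of zero hits along the absolute positions, starting at q
def czhCore (q : Int) : List String → Nat
  | [] => 0
  | s :: r =>
    (if PySem.Int.mod (q + czhDelta s) 100 = 0 then 1 else 0) + czhCore (q + czhDelta s) r

theorem czh_foldl_append (ds : List Int) (t : Int) (acc : List Int) :
    (ds.foldl (fun (st : Int × List Int) d => (st.1 + d, st.2 ++ [st.1 + d])) (t, acc)).2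
      = acc ++ czhPrefixes t ds := by
  induction ds generalizing t acc with
  | nil => simp [czhPrefixes]
  | cons d ds ih => simp [czhPrefixes, ih]

theorem czh_countP_prefixes (l : List String) (start t : Int) :
    ((czhPrefixes t (l.map czhDelta)).countP
      (fun x => PySem.Int.mod (start + x) 100 == 0) : Nat) = czhCore (start + t) l := by
  induction l generalizing t with
  | nil => simp [czhPrefixes, czhCore]
  | cons s r ih =>
    simp only [List.map_cons, czhPrefixes, czhCore, List.countP_cons]
    rw [← add_assoc, ih (t + czhDelta s)]
    by_cases h : PySem.Int.mod (start + (t + czhDelta s)) 100 = 0 <;>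
      simp [← add_assoc, Nat.add_comm]

theorem czh_alt_eq_core (start : Int) (l : List String) :
    count_zero_hits_alt start l = (czhCore start l : Int) := by
  simp only [count_zero_hits_alt, czh_foldl_append, List.nil_append]
  have h := czh_countP_prefixes l start 0
  rw [add_zero] at h
  rw [← h]

theorem czh_startswith_L (s : String) (hs : s ≠ "") :
    PySem.Str.startswith s "L" = true ↔ (PySem.Str.pyGet? s 0).getD ' ' = 'L' := by
  have hl : s.toList ≠ [] := by
    intro h
    exact hs (by rwa [String.toList_eq_nil_iff] at h)
  cases hcs : s.toList with
  | nil => exact absurd hcs hl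
  | cons c cs =>
    have hget : PySem.Str.pyGet? s 0 = some c := by
      have : PySem.Str.pyGet? s ((0 : Nat) : Int) = s.toList[(0 : Nat)]? :=
        PySem.Str.pyGet?_natCast s 0
      simp only [hcs] at this
      simpa using this
    rw [hget, PySem.Str.startswith_eq, PySem.Chars.startswith_iff]
    show "L".toList <+: s.toList ↔ _
    simp [hcs, List.cons_prefix_cons, eq_comm]

theorem czh_main (l : List String) (p q cnt : Int)
    (hpre : ∀ s ∈ l, s ≠ "" ∧ (PySem.Int.ofStr? (PySem.Str.slice s (some 1) none)).isSome)
    (h : PySem.Int.mod p 100 = PySem.Int.mod q 100) :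
    (l.foldl czhStepA (p, cnt)).2 = cnt + (czhCore q l : Int) := by
  induction l generalizing p q cnt with
  | nil => simp [czhCore]
  | cons s r ih =>
    obtain ⟨hs, -⟩ := hpre s (List.mem_cons_self ..)
    have hmodpos : ∀ a : Int, PySem.Int.mod a 100 = a % 100 := fun a =>
      PySem.Int.mod_eq_emod_of_pos (by norm_num)
    have hmq : ∀ a : Int,
        PySem.Int.mod (p + a) 100 = PySem.Int.mod (q + a) 100 := by
      intro a
      rw [hmodpos p, hmodpos q] at h
      rw [hmodpos, hmodpos]
      exact Int.ModEq.add_right a h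
    have hnext : ∀ x : Int, PySem.Int.mod (PySem.Int.mod x 100) 100 = PySem.Int.mod x 100 := by
      intro x
      rw [hmodpos, hmodpos, Int.emod_emod_of_dvd _ dvd_rfl]
    have hpre' := fun s hs => hpre s (List.mem_cons_of_mem _ hs)
    simp only [List.foldl_cons, czhStepA, czhCore]
    by_cases hd : (PySem.Str.pyGet? s 0).getD ' ' = 'L'
    · have hsw : PySem.Str.startswith s "L" = true := (czh_startswith_L s hs).mpr hd
      have hδ : czhDelta s
          = -((PySem.Int.ofStr? (PySem.Str.slice s (some 1) none)).getD 0) := by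
        simp only [czhDelta]; rw [hsw]; simp
      have hpos : PySem.Int.mod (p - (PySem.Int.ofStr? (PySem.Str.slice s (some 1) none)).getD 0) 100
          = PySem.Int.mod (q + czhDelta s) 100 := by
        rw [hδ]
        simpa [sub_eq_add_neg] using
          hmq (-((PySem.Int.ofStr? (PySem.Str.slice s (some 1) none)).getD 0))
      rw [if_pos hd]
      rw [ih _ (q + czhDelta s) _ hpre' (by rw [hpos]; exact hnext _)]
      rw [hpos]
      by_cases hz : PySem.Int.mod (q + czhDelta s) 100 = 0
      · simp only [if_pos hz]; push_cast; ring
      · simp only [if_neg hz]; push_cast; ring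
    · have hsw : PySem.Str.startswith s "L" = false := by
        rw [← Bool.not_eq_true, czh_startswith_L s hs]; exact hd
      have hδ : czhDelta s
          = (PySem.Int.ofStr? (PySem.Str.slice s (some 1) none)).getD 0 := by
        simp only [czhDelta]; rw [hsw]; simp
      have hpos : PySem.Int.mod (p + (PySem.Int.ofStr? (PySem.Str.slice s (some 1) none)).getD 0) 100
          = PySem.Int.mod (q + czhDelta s) 100 := by
        rw [hδ, hmq]
      rw [if_neg hd]
      rw [ih _ (q + czhDelta s) _ hpre' (by rw [hpos]; exact hnext _)]
      rw [hpos]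
      by_cases hz : PySem.Int.mod (q + czhDelta s) 100 = 0
      · simp only [if_pos hz]; push_cast; ring
      · simp only [if_neg hz]; push_cast; ring

-- ===== VERDICT (by name: the statement is the Claim_ definition above) =====
theorem count_zero_hits_spec : Claim_equal_count_zero_hits := by
  intro start_position instructions _ hpre
  unfold Spec_count_zero_hits count_zero_hits
  rw [czh_alt_eq_core, czh_main instructions start_position start_position 0 hpre rfl,
    zero_add]
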